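-- pv_equiv track=rewrite | github.com/all-day-and-night/algorithms | swea/coin_upset.py | solution
-- ===== SOURCE A (Python) =====
-- def check(beginning, target, row_bit, col_bit):
--     R, C = len(beginning), len(beginning[0])
--
--     for r in range(R):
--         r_check = 1 if row_bit & (1 << r) > 0 else 0
--         for c in range(C):
--             c_check = 1 if col_bit & (1 << c) > 0 else 0
--             status =  beginning[r][c] + r_check + c_check - target[r][c]
--             if status % 2 == 1:
--                 return False
--     return True
--
-- def count(bit):
--     cnt = 0
--     while bit > 0:
--         if bit & 1:
--             cnt += 1
--         bit >>= 1
--     return cnt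
--
-- def solution(beginning, target):
--     R, C = len(beginning), len(beginning[0])
--
--     answer = int(1e9)
--     for row_bit in range(1 << R): # or 2 ** R
--         for col_bit in range(1 << C): # or 2 ** C
--             # check
--             status = check(beginning, target, row_bit, col_bit)
--             if status:
--                 answer = min(answer, count(row_bit) + count(col_bit))
--
--     return answer if answer != int(1e9) else -1
-- ===== SOURCE B (Python) =====
-- # XOR-constraint propagation: try both values of the row-0 flip, propagate the
-- # forced column/row flips, check consistency, keep the cheaper assignment.
-- # Keeps A's result convention (best stays INF -> -1).
--
-- def _cols(d, C, first):
--     return [(d[0][c] + first) % 2 for c in range(C)]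
--
-- def _rows(d, R, first):
--     return [first] + [(d[r][0] + (d[0][0] + first) % 2) % 2 for r in range(1, R)]
--
-- def solution(beginning, target):
--     R, C = len(beginning), len(beginning[0])
--     d = [[(beginning[r][c] - target[r][c]) % 2 for c in range(C)] for r in range(R)]
--     if C == 0:
--         return 0
--     best = int(1e9)
--     for first in (0, 1):
--         rows = _rows(d, R, first)
--         cols = _cols(d, C, first)
--         if all((d[r][c] + rows[r] + cols[c]) % 2 == 0 for r in range(R) for c in range(C)):
--             best = min(best, sum(rows) + sum(cols))
--     return best if best != int(1e9) else -1
-- ===== Notes on version B (the rewrite author's own statement) =====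
-- stated objective: faster
-- what changed: Replaces the brute-force enumeration of all 2^R row masks x 2^C column masks with XOR-constraint propagation: fix the row-0 flip to 0 or 1, propagate the forced column and row flips, check consistency, and take the cheaper of the two assignments, keeping A's INF/-1 result convention.
-- outside the precondition, e.g. on solution([[0, 0], [0, 1], [0]], [[0, 0], [0, 0], [0, 0]]): A returns -1, B raises IndexError
import Mathlib
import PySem

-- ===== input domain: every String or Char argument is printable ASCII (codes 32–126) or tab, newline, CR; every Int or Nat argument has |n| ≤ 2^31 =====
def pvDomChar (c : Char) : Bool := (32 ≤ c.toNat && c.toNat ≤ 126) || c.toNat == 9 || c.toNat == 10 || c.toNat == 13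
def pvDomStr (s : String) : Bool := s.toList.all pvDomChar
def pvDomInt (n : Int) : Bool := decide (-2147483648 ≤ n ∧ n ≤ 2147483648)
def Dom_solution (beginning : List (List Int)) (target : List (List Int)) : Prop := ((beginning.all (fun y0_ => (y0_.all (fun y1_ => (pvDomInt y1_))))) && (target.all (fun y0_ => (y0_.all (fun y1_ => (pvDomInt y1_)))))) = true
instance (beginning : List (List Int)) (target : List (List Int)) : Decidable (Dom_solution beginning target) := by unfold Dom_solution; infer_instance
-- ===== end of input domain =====

-- B replaces A's brute-force enumeration of all 2^R × 2^C row/column flip masks by XOR-constraint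
-- propagation (try both values of the row-0 flip, propagate, check consistency, take the cheaper),
-- keeping A's INF/-1 result convention.

-- ===== PORT A =====
-- literal port of check(beginning, target, row_bit, col_bit); the early `return False`
-- of the double loop is the short-circuit of List.all
def checkA (beginning target : List (List Int)) (row_bit col_bit : Nat) : Bool :=
  let R := beginning.length
  let C := (beginning.headD []).length
  (List.range R).all fun r =>
    let r_check : Int := if row_bit &&& (1 <<< r) > 0 then 1 else 0
    (List.range C).all fun c =>
      let c_check : Int := if col_bit &&& (1 <<< c) > 0 then 1 else 0
      let status := (beginning.getD r []).getD c 0 + r_check + c_check - (target.getD r []).getD c 0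
      !(status % 2 == 1)

-- literal port of count(bit): the while loop as recursion on bit
def countA (bit : Nat) : Int :=
  if bit > 0 then (if bit &&& 1 = 1 then (1 : Int) else 0) + countA (bit >>> 1) else 0
termination_by bit
decreasing_by simp only [Nat.shiftRight_one]; omega

def solution (beginning : List (List Int)) (target : List (List Int)) : Int :=
  let R := beginning.length
  let C := (beginning.headD []).length
  let answer : Int :=
    (List.range (2 ^ R)).foldl (fun answer row_bit =>
      (List.range (2 ^ C)).foldl (fun answer col_bit =>
        if checkA beginning target row_bit col_bit then
          min answer (countA row_bit + countA col_bit)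
        else answer) answer) 1000000000
  if answer ≠ 1000000000 then answer else -1

-- ===== PORT B =====
-- the difference-parity grid d (B's list comprehension)
def dmatB (beginning target : List (List Int)) : List (List Int) :=
  (List.range beginning.length).map fun r =>
    (List.range (beginning.headD []).length).map fun c =>
      ((beginning.getD r []).getD c 0 - (target.getD r []).getD c 0) % 2

-- port of _cols(d, C, first)
def colsB (d : List (List Int)) (C : Nat) (first : Int) : List Int :=
  (List.range C).map fun c => ((d.getD 0 []).getD c 0 + first) % 2

-- port of _rows(d, R, first)
def rowsB (d : List (List Int)) (R : Nat) (first : Int) : List Int :=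
  first :: (List.range' 1 (R - 1)).map fun r =>
    ((d.getD r []).getD 0 0 + ((d.getD 0 []).getD 0 0 + first) % 2) % 2

def solution_alt (beginning : List (List Int)) (target : List (List Int)) : Int :=
  let R := beginning.length
  let C := (beginning.headD []).length
  let d := dmatB beginning target
  if C = 0 then 0
  else
    let best := ([0, 1] : List Int).foldl (fun best first =>
      let rows := rowsB d R first
      let cols := colsB d C first
      if (List.range R).all (fun r => (List.range C).all fun c =>
          ((d.getD r []).getD c 0 + rows.getD r 0 + cols.getD c 0) % 2 == 0) then
        min best (rows.sum + cols.sum)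
      else best) 1000000000
    if best ≠ 1000000000 then best else -1

-- ===== PRECONDITION & SPEC =====
-- Pre_ excludes empty `beginning` and (when row 0 of `beginning` is nonempty) grids whose
-- `beginning`/`target` rows are shorter than row 0 of `beginning`: there A raises IndexError for
-- some flip mask, or returns -1 only by the accident of which in-range cell fails a parity check
-- first; B reads the whole grid up front and raises IndexError on all of them.
def Pre_solution (beginning : List (List Int)) (target : List (List Int)) : Prop :=
  beginning ≠ [] ∧
  ((beginning.headD []).length = 0 ∨
    ((∀ row ∈ beginning, (beginning.headD []).length ≤ row.length) ∧
      beginning.length ≤ target.length ∧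
      (∀ row ∈ target.take beginning.length, (beginning.headD []).length ≤ row.length)))

instance (beginning : List (List Int)) (target : List (List Int)) : Decidable (Pre_solution beginning target) := by
  unfold Pre_solution; infer_instance

def pvWitness_solution : List (List Int) × List (List Int) :=
  ([[0, 1], [1, 0]], [[1, 0], [0, 1]])

def Spec_solution (beginning : List (List Int)) (target : List (List Int)) (out : Int) : Prop := out = solution_alt beginning target
instance (beginning : List (List Int)) (target : List (List Int)) (out : Int) : Decidable (Spec_solution beginning target out) := by unfold Spec_solution; infer_instance

-- ===== CLAIM (what is proved, stated in full; the proofs are below) =====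
def Claim_equal_solution : Prop := ∀ (beginning : List (List Int)) (target : List (List Int)), Dom_solution beginning target → Pre_solution beginning target → Spec_solution beginning target (solution beginning target)

-- ===== LEMMAS AND PROOFS =====

-- difference parity of cell (r, c)
def db (b t : List (List Int)) (r c : Nat) : Int :=
  ((b.getD r []).getD c 0 - (t.getD r []).getD c 0) % 2

-- the flip applied at index i by mask m, as an integer
def bitv (m i : Nat) : Int := if m.testBit i then 1 else 0

-- the number whose binary digits 0..n-1 are g 0 .. g (n-1)
def maskOf (g : Nat → Bool) : Nat → Nat
  | 0 => 0
  | n + 1 => (if g 0 then 1 else 0) + 2 * maskOf (fun i => g (i + 1)) n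

-- min-fold over candidates, as in A's main loop
def mfold {α : Type} (l : List α) (p : α → Bool) (v : α → Int) (a : Int) : Int :=
  l.foldl (fun a x => if p x then min a (v x) else a) a

-- the two canonical flip-cost sums
def SRd (b t : List (List Int)) : Int :=
  ((List.range b.length).map (fun r => (db b t r 0 + db b t 0 0) % 2)).sum
def SCd (b t : List (List Int)) : Int :=
  ((List.range (b.headD []).length).map (fun c => db b t 0 c)).sum

theorem db_nonneg (b t : List (List Int)) (r c : Nat) : 0 ≤ db b t r c := by
  unfold db; omega

theorem db_lt (b t : List (List Int)) (r c : Nat) : db b t r c < 2 := by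
  unfold db; omega

theorem bitv_shift (m i : Nat) :
    (if m &&& (1 <<< i) > 0 then (1 : Int) else 0) = bitv m i := by
  unfold bitv
  rw [Nat.one_shiftLeft, Nat.and_two_pow]
  cases h : m.testBit i <;> simp

theorem bitv_mem (m i : Nat) : bitv m i = 0 ∨ bitv m i = 1 := by
  unfold bitv; split <;> simp

theorem checkA_point (B T x y : Int) :
    (!((B + x + y - T) % 2 == 1)) = true ↔ (x + y + (B - T) % 2) % 2 = 0 := by
  simp only [Bool.not_eq_eq_eq_not, Bool.not_true, beq_eq_false_iff_ne, ne_eq]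
  constructor <;> intro h <;> omega

theorem checkA_iff (b t : List (List Int)) (rb cb : Nat) :
    checkA b t rb cb = true ↔
      ∀ r < b.length, ∀ c < (b.headD []).length,
        (bitv rb r + bitv cb c + db b t r c) % 2 = 0 := by
  unfold checkA
  simp only [List.all_eq_true, List.mem_range, bitv_shift]
  constructor
  · intro h r hr c hc
    exact (checkA_point _ _ _ _).mp (h r hr c hc)
  · intro h r hr c hc
    exact (checkA_point _ _ _ _).mpr (h r hr c hc)

theorem maskOf_lt (g : Nat → Bool) (n : Nat) : maskOf g n < 2 ^ n := by
  induction n generalizing g with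
  | zero => simp [maskOf]
  | succ n ih =>
    have := ih (fun i => g (i + 1))
    simp only [maskOf, pow_succ]
    split <;> omega

theorem testBit_maskOf (g : Nat → Bool) (n i : Nat) (hi : i < n) :
    (maskOf g n).testBit i = g i := by
  induction n generalizing g i with
  | zero => omega
  | succ n ih =>
    cases i with
    | zero =>
      simp only [maskOf, Nat.testBit_zero]
      split <;> rename_i h <;> simp only [Nat.add_mul_mod_self_left] <;> simp [h]
    | succ i =>
      have h2 : ((if g 0 then 1 else 0) + 2 * maskOf (fun i => g (i + 1)) n) / 2
          = maskOf (fun i => g (i + 1)) n := by split <;> omega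
      simp only [maskOf, Nat.testBit_succ, h2]
      exact ih (fun i => g (i + 1)) i (by omega)

theorem countA_step (bq m : Nat) (hb : bq = 0 ∨ bq = 1) :
    countA (bq + 2 * m) = (bq : Int) + countA m := by
  rw [countA]
  rcases hb with h | h <;> subst h
  · simp only [Nat.zero_add]
    split <;> rename_i h
    · have h1 : (2 * m) &&& 1 = 0 := by
        rw [Nat.and_one_is_mod]; omega
      have h2 : (2 * m) >>> 1 = m := by rw [Nat.shiftRight_one]; omega
      rw [h1, h2]; simp
    · have : m = 0 := by omega
      subst this; rw [countA]; simp
  · have h1 : (1 + 2 * m) &&& 1 = 1 := by rw [Nat.and_one_is_mod]; omega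
    have h2 : (1 + 2 * m) >>> 1 = m := by rw [Nat.shiftRight_one]; omega
    have h3 : 1 + 2 * m > 0 := by omega
    rw [if_pos h3, h1, h2]; simp

theorem countA_maskOf (g : Nat → Bool) (n : Nat) :
    countA (maskOf g n) = ((List.range n).map (fun i => if g i then (1 : Int) else 0)).sum := by
  induction n generalizing g with
  | zero => simp [maskOf, countA]
  | succ n ih =>
    rw [List.range_succ_eq_map]
    simp only [maskOf, List.map_cons, List.sum_cons, List.map_map]
    rw [countA_step _ _ (by split <;> simp)]
    rw [ih (fun i => g (i + 1))]
    split <;> simp [Function.comp_def]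

theorem countA_nonneg (bit : Nat) : 0 ≤ countA bit := by
  induction bit using Nat.strong_induction_on with
  | _ n ih =>
    rw [countA]
    split <;> rename_i h
    · have := ih (n >>> 1) (by rw [Nat.shiftRight_one]; omega)
      split <;> omega
    · omega

theorem mfold_le_init {α : Type} (l : List α) (p : α → Bool) (v : α → Int) (a : Int) :
    mfold l p v a ≤ a := by
  induction l generalizing a with
  | nil => simp [mfold]
  | cons x xs ih =>
    simp only [mfold, List.foldl_cons]
    split
    · exact le_trans (ih _) (min_le_left _ _)
    · exact ih a

theorem mfold_le {α : Type} (l : List α) (p : α → Bool) (v : α → Int) (a : Int) (x : α)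
    (hx : x ∈ l) (hp : p x = true) : mfold l p v a ≤ v x := by
  induction l generalizing a with
  | nil => simp at hx
  | cons y ys ih =>
    simp only [mfold, List.foldl_cons]
    rcases List.mem_cons.mp hx with h | h
    · subst h; rw [hp]
      exact le_trans (mfold_le_init _ _ _ _) (min_le_right _ _)
    · split <;> exact ih _ h

theorem mfold_cons {α : Type} (y : α) (ys : List α) (p : α → Bool) (v : α → Int) (a : Int) :
    mfold (y :: ys) p v a = mfold ys p v (if p y then min a (v y) else a) := rfl

theorem mfold_cases {α : Type} (l : List α) (p : α → Bool) (v : α → Int) (a : Int) :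
    mfold l p v a = a ∨ ∃ x ∈ l, p x = true ∧ mfold l p v a = v x := by
  induction l generalizing a with
  | nil => left; simp [mfold]
  | cons y ys ih =>
    rw [mfold_cons]
    split <;> rename_i h
    · rcases ih (min a (v y)) with h1 | ⟨x, hx, hp, he⟩
      · by_cases h2 : a ≤ v y
        · left; rw [h1, min_eq_left h2]
        · right; exact ⟨y, List.mem_cons_self .., h, by rw [h1, min_eq_right (by omega)]⟩
      · right; exact ⟨x, List.mem_cons_of_mem _ hx, hp, he⟩
    · rcases ih a with h1 | ⟨x, hx, hp, he⟩
      · left; exact h1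
      · right; exact ⟨x, List.mem_cons_of_mem _ hx, hp, he⟩

theorem foldl_flatMap {α β γ : Type} (l : List α) (g : α → List β) (f : γ → β → γ) (a : γ) :
    (l.flatMap g).foldl f a = l.foldl (fun a x => (g x).foldl f a) a := by
  induction l generalizing a with
  | nil => rfl
  | cons x xs ih => simp [List.flatMap_cons, List.foldl_append, ih]

theorem getD_map_range {β : Type} (g : Nat → β) (n r : Nat) (x : β) (hr : r < n) :
    ((List.range n).map g).getD r x = g r := by
  rw [List.getD_eq_getElem?_getD, List.getElem?_map, List.getElem?_range hr]
  rfl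

theorem getD_map_range' {β : Type} (g : Nat → β) (n i : Nat) (x : β) (h : i < n) :
    ((List.range' 1 n).map g).getD i x = g (1 + i) := by
  have hl : i < ((List.range' 1 n).map g).length := by
    simp [List.length_range']; omega
  rw [List.getD_eq_getElem?_getD, List.getElem?_eq_getElem hl]
  simp [List.getElem_range']

-- row/column consistency of the difference grid
def ConD (b t : List (List Int)) : Prop :=
  ∀ r < b.length, ∀ c < (b.headD []).length,
    (db b t r c + db b t r 0 + db b t 0 c + db b t 0 0) % 2 = 0

-- the two canonical flip assignments (as bit functions)
def grB (b t : List (List Int)) (r : Nat) : Bool := decide ((db b t r 0 + db b t 0 0) % 2 = 1)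
def gcB (b t : List (List Int)) (c : Nat) : Bool := decide (db b t 0 c = 1)

def pairsD (R C : Nat) : List (Nat × Nat) :=
  (List.range (2 ^ R)).flatMap fun rb => (List.range (2 ^ C)).map fun cb => (rb, cb)

theorem mem_pairs (R C : Nat) (x : Nat × Nat) :
    x ∈ pairsD R C ↔ x.1 < 2 ^ R ∧ x.2 < 2 ^ C := by
  cases x with | mk a c =>
  simp [pairsD, List.mem_flatMap, List.mem_map, List.mem_range, Prod.ext_iff]

theorem solution_fold (b t : List (List Int)) (init : Int) :
    (List.range (2 ^ b.length)).foldl (fun answer row_bit =>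
      (List.range (2 ^ (b.headD []).length)).foldl (fun answer col_bit =>
        if checkA b t row_bit col_bit then min answer (countA row_bit + countA col_bit)
        else answer) answer) init
    = mfold (pairsD b.length (b.headD []).length)
        (fun x => checkA b t x.1 x.2) (fun x => countA x.1 + countA x.2) init := by
  rw [mfold, pairsD, foldl_flatMap]
  simp only [List.foldl_map]

theorem bitv_maskOf (g : Nat → Bool) (n i : Nat) (h : i < n) :
    bitv (maskOf g n) i = if g i then 1 else 0 := by
  unfold bitv; rw [testBit_maskOf g n i h]

theorem ind_not (g : Bool) : (if !g then (1 : Int) else 0) = 1 - (if g then 1 else 0) := by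
  cases g <;> simp

theorem ind_row (b t : List (List Int)) (r : Nat) :
    (if grB b t r then (1 : Int) else 0) = (db b t r 0 + db b t 0 0) % 2 := by
  unfold grB
  have := db_nonneg b t r 0; have := db_lt b t r 0
  have := db_nonneg b t 0 0; have := db_lt b t 0 0
  split <;> rename_i h <;> simp at h <;> omega

theorem ind_col (b t : List (List Int)) (c : Nat) :
    (if gcB b t c then (1 : Int) else 0) = db b t 0 c := by
  unfold gcB
  have := db_nonneg b t 0 c; have := db_lt b t 0 c
  split <;> rename_i h <;> simp at h <;> omega

theorem valid_con (b t : List (List Int)) (rb cb : Nat)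
    (h : checkA b t rb cb = true) : ConD b t := by
  rw [checkA_iff] at h
  intro r hr c hc
  have e1 := h r hr c hc
  have e2 := h r hr 0 (by omega)
  have e3 := h 0 (by omega) c hc
  have e4 := h 0 (by omega) 0 (by omega)
  have := bitv_mem rb r; have := bitv_mem rb 0
  have := bitv_mem cb c; have := bitv_mem cb 0
  omega

theorem con_valid0 (b t : List (List Int)) (hcon : ConD b t) :
    checkA b t (maskOf (grB b t) b.length) (maskOf (gcB b t) (b.headD []).length) = true := by
  rw [checkA_iff]
  intro r hr c hc
  rw [bitv_maskOf _ _ _ hr, bitv_maskOf _ _ _ hc, ind_row, ind_col]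
  have := hcon r hr c hc
  have := db_nonneg b t r c; have := db_lt b t r c
  have := db_nonneg b t r 0; have := db_lt b t r 0
  have := db_nonneg b t 0 c; have := db_lt b t 0 c
  have := db_nonneg b t 0 0; have := db_lt b t 0 0
  omega

theorem con_valid1 (b t : List (List Int)) (hcon : ConD b t) :
    checkA b t (maskOf (fun r => !grB b t r) b.length)
      (maskOf (fun c => !gcB b t c) (b.headD []).length) = true := by
  rw [checkA_iff]
  intro r hr c hc
  rw [bitv_maskOf _ _ _ hr, bitv_maskOf _ _ _ hc, ind_not, ind_not, ind_row, ind_col]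
  have := hcon r hr c hc
  have := db_nonneg b t r c; have := db_lt b t r c
  have := db_nonneg b t r 0; have := db_lt b t r 0
  have := db_nonneg b t 0 c; have := db_lt b t 0 c
  have := db_nonneg b t 0 0; have := db_lt b t 0 0
  omega

theorem bitv_eq_mod (m i : Nat) (x : Int) (h : bitv m i = x) :
    m.testBit i = decide (x = 1) := by
  subst h; unfold bitv; cases h2 : m.testBit i <;> simp

theorem testBit_high (m n i : Nat) (hm : m < 2 ^ n) (hi : n ≤ i) : m.testBit i = false :=
  Nat.testBit_eq_false_of_lt (lt_of_lt_of_le hm (Nat.pow_le_pow_right (by norm_num) hi))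

theorem unique (b t : List (List Int)) (rb cb : Nat)
    (hR : 0 < b.length) (hC : 0 < (b.headD []).length)
    (hrb : rb < 2 ^ b.length) (hcb : cb < 2 ^ (b.headD []).length)
    (hch : checkA b t rb cb = true) :
    (rb = maskOf (grB b t) b.length ∧ cb = maskOf (gcB b t) (b.headD []).length) ∨
    (rb = maskOf (fun r => !grB b t r) b.length ∧
      cb = maskOf (fun c => !gcB b t c) (b.headD []).length) := by
  have hiff := (checkA_iff b t rb cb).mp hch
  by_cases a0 : rb.testBit 0
  · right
    have b0 : bitv rb 0 = 1 := by unfold bitv; simp [a0]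
    constructor
    · apply Nat.eq_of_testBit_eq; intro i
      by_cases hi : i < b.length
      · have e1 := hiff i hi 0 hC
        have e2 := hiff 0 hR 0 hC
        have hx : bitv rb i = 1 - (db b t i 0 + db b t 0 0) % 2 := by
          have := bitv_mem rb i; have := bitv_mem cb 0
          have := db_nonneg b t i 0; have := db_lt b t i 0
          have := db_nonneg b t 0 0; have := db_lt b t 0 0
          omega
        rw [testBit_maskOf _ _ _ hi, bitv_eq_mod rb i _ hx]
        unfold grB
        have hD : (db b t i 0 + db b t 0 0) % 2 = 0 ∨ (db b t i 0 + db b t 0 0) % 2 = 1 := by omega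
        rcases hD with h | h <;> simp [h]
      · rw [testBit_high rb b.length i hrb (by omega),
            testBit_high _ b.length i (maskOf_lt _ _) (by omega)]
    · apply Nat.eq_of_testBit_eq; intro i
      by_cases hi : i < (b.headD []).length
      · have e1 := hiff 0 hR i hi
        have hx : bitv cb i = 1 - db b t 0 i := by
          have := bitv_mem cb i
          have := db_nonneg b t 0 i; have := db_lt b t 0 i
          omega
        rw [testBit_maskOf _ _ _ hi, bitv_eq_mod cb i _ hx]
        unfold gcB
        have hD : db b t 0 i = 0 ∨ db b t 0 i = 1 := by
          have := db_nonneg b t 0 i; have := db_lt b t 0 i; omega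
        rcases hD with h | h <;> simp [h]
      · rw [testBit_high cb _ i hcb (by omega),
            testBit_high _ _ i (maskOf_lt _ _) (by omega)]
  · left
    have b0 : bitv rb 0 = 0 := by unfold bitv; simp [a0]
    constructor
    · apply Nat.eq_of_testBit_eq; intro i
      by_cases hi : i < b.length
      · have e1 := hiff i hi 0 hC
        have e2 := hiff 0 hR 0 hC
        have hx : bitv rb i = (db b t i 0 + db b t 0 0) % 2 := by
          have := bitv_mem rb i; have := bitv_mem cb 0
          have := db_nonneg b t i 0; have := db_lt b t i 0
          have := db_nonneg b t 0 0; have := db_lt b t 0 0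
          omega
        rw [testBit_maskOf _ _ _ hi, bitv_eq_mod rb i _ hx]
        rfl
      · rw [testBit_high rb b.length i hrb (by omega),
            testBit_high _ b.length i (maskOf_lt _ _) (by omega)]
    · apply Nat.eq_of_testBit_eq; intro i
      by_cases hi : i < (b.headD []).length
      · have e1 := hiff 0 hR i hi
        have hx : bitv cb i = db b t 0 i := by
          have := bitv_mem cb i
          have := db_nonneg b t 0 i; have := db_lt b t 0 i
          omega
        rw [testBit_maskOf _ _ _ hi, bitv_eq_mod cb i _ hx]
        rfl
      · rw [testBit_high cb _ i hcb (by omega),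
            testBit_high _ _ i (maskOf_lt _ _) (by omega)]

theorem count0 (b t : List (List Int)) :
    countA (maskOf (grB b t) b.length) + countA (maskOf (gcB b t) (b.headD []).length)
      = SRd b t + SCd b t := by
  rw [countA_maskOf, countA_maskOf]
  unfold SRd SCd
  congr 1
  · exact congrArg List.sum (List.map_congr_left fun i _ => ind_row b t i)
  · exact congrArg List.sum (List.map_congr_left fun i _ => ind_col b t i)

theorem sum_not (g : Nat → Bool) (n : Nat) :
    ((List.range n).map (fun i => if !g i then (1 : Int) else 0)).sum
      = n - ((List.range n).map (fun i => if g i then (1 : Int) else 0)).sum := by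
  induction n with
  | zero => simp
  | succ n ih =>
    rw [List.range_succ]
    simp only [List.map_append, List.sum_append, List.map_cons, List.sum_cons,
      List.map_nil, List.sum_nil, ih]
    push_cast
    cases g n <;> (first | (simp; ring) | simp)

theorem count1 (b t : List (List Int)) :
    countA (maskOf (fun r => !grB b t r) b.length)
      + countA (maskOf (fun c => !gcB b t c) (b.headD []).length)
    = (b.length : Int) + ((b.headD []).length : Int)
      - (countA (maskOf (grB b t) b.length) + countA (maskOf (gcB b t) (b.headD []).length)) := by
  rw [countA_maskOf, countA_maskOf, countA_maskOf, countA_maskOf, sum_not, sum_not]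
  ring

theorem dmatB_get (b t : List (List Int)) (r c : Nat)
    (hr : r < b.length) (hc : c < (b.headD []).length) :
    ((dmatB b t).getD r []).getD c 0 = db b t r c := by
  unfold dmatB
  rw [getD_map_range _ _ _ _ hr, getD_map_range _ _ _ _ hc]
  rfl

theorem colsB_getD (b t : List (List Int)) (f : Int) (c : Nat)
    (hR : 0 < b.length) (hc : c < (b.headD []).length) :
    (colsB (dmatB b t) (b.headD []).length f).getD c 0 = (db b t 0 c + f) % 2 := by
  unfold colsB
  rw [getD_map_range _ _ _ _ hc, dmatB_get b t 0 c hR hc]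

theorem rowsB_getD (b t : List (List Int)) (f : Int) (r : Nat)
    (hC : 0 < (b.headD []).length) (hr : r < b.length) :
    (rowsB (dmatB b t) b.length f).getD r 0 =
      if r = 0 then f else (db b t r 0 + (db b t 0 0 + f) % 2) % 2 := by
  have hR : 0 < b.length := by omega
  unfold rowsB
  cases r with
  | zero => rfl
  | succ n =>
    simp only [List.getD_cons_succ, if_neg (Nat.succ_ne_zero n)]
    rw [getD_map_range' _ _ _ _ (by omega)]
    rw [dmatB_get b t (1 + n) 0 (by omega) hC, dmatB_get b t 0 0 hR hC]
    rw [Nat.add_comm 1 n]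

-- the per-cell equivalence of B's consistency check with ConD
theorem cell_iff (b t : List (List Int)) (f : Int) (hf : f = 0 ∨ f = 1) (r c : Nat) :
    ((db b t r c + (if r = 0 then f else (db b t r 0 + (db b t 0 0 + f) % 2) % 2)
        + (db b t 0 c + f) % 2) % 2 = 0)
      ↔ (db b t r c + db b t r 0 + db b t 0 c + db b t 0 0) % 2 = 0 := by
  have := db_nonneg b t r c; have := db_lt b t r c
  have := db_nonneg b t r 0; have := db_lt b t r 0
  have := db_nonneg b t 0 c; have := db_lt b t 0 c
  have := db_nonneg b t 0 0; have := db_lt b t 0 0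
  by_cases h : r = 0
  · subst h; rcases hf with rfl | rfl <;> constructor <;> intro _ <;> omega
  · rw [if_neg h]; rcases hf with rfl | rfl <;> constructor <;> intro _ <;> omega

theorem chkB_iff (b t : List (List Int)) (f : Int) (hf : f = 0 ∨ f = 1)
    (hR : 0 < b.length) (hC : 0 < (b.headD []).length) :
    ((List.range b.length).all fun r => (List.range (b.headD []).length).all fun c =>
      (((dmatB b t).getD r []).getD c 0 + (rowsB (dmatB b t) b.length f).getD r 0
        + (colsB (dmatB b t) (b.headD []).length f).getD c 0) % 2 == 0) = true
      ↔ ConD b t := by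
  simp only [List.all_eq_true, List.mem_range, beq_iff_eq]
  constructor
  · intro h r hr c hc
    have hh := h r hr c hc
    rw [dmatB_get b t r c hr hc, rowsB_getD b t f r hC hr, colsB_getD b t f c hR hc] at hh
    exact (cell_iff b t f hf r c).mp hh
  · intro h r hr c hc
    rw [dmatB_get b t r c hr hc, rowsB_getD b t f r hC hr, colsB_getD b t f c hR hc]
    exact (cell_iff b t f hf r c).mpr (h r hr c hc)

theorem sum_one_sub (l : List Nat) (g : Nat → Int) :
    (l.map fun i => 1 - g i).sum = (l.length : Int) - (l.map g).sum := by
  induction l with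
  | nil => simp
  | cons x xs ih => simp [ih]; ring

theorem range_cons (n : Nat) (hn : 0 < n) :
    List.range n = 0 :: List.range' 1 (n - 1) := by
  obtain ⟨m, rfl⟩ : ∃ m, n = m + 1 := ⟨n - 1, by omega⟩
  rw [List.range_eq_range', List.range'_succ]
  simp

theorem SRd_split (b t : List (List Int)) (hR : 0 < b.length) :
    SRd b t = ((List.range' 1 (b.length - 1)).map
        (fun r => (db b t r 0 + db b t 0 0) % 2)).sum := by
  unfold SRd
  rw [range_cons b.length hR]
  simp only [List.map_cons, List.sum_cons]
  have h0 : (db b t 0 0 + db b t 0 0) % 2 = 0 := by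
    have := db_nonneg b t 0 0; have := db_lt b t 0 0; omega
  rw [h0]; ring

theorem rows_sum_zero (b t : List (List Int))
    (hR : 0 < b.length) (hC : 0 < (b.headD []).length) :
    (rowsB (dmatB b t) b.length 0).sum = SRd b t := by
  unfold rowsB
  simp only [List.sum_cons]
  rw [SRd_split b t hR]
  have : ((List.range' 1 (b.length - 1)).map fun r =>
      (((dmatB b t).getD r []).getD 0 0 + (((dmatB b t).getD 0 []).getD 0 0 + 0) % 2) % 2)
      = (List.range' 1 (b.length - 1)).map fun r => (db b t r 0 + db b t 0 0) % 2 := by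
    apply List.map_congr_left
    intro r hr
    have hr' := List.mem_range'_1.mp hr
    rw [dmatB_get b t r 0 (by omega) hC, dmatB_get b t 0 0 hR hC]
    have := db_nonneg b t r 0; have := db_lt b t r 0
    have := db_nonneg b t 0 0; have := db_lt b t 0 0
    omega
  rw [this]; ring

theorem rows_sum_one (b t : List (List Int))
    (hR : 0 < b.length) (hC : 0 < (b.headD []).length) :
    (rowsB (dmatB b t) b.length 1).sum = (b.length : Int) - SRd b t := by
  unfold rowsB
  simp only [List.sum_cons]
  have h1 : ((List.range' 1 (b.length - 1)).map fun r =>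
      (((dmatB b t).getD r []).getD 0 0 + (((dmatB b t).getD 0 []).getD 0 0 + 1) % 2) % 2)
      = (List.range' 1 (b.length - 1)).map fun r => 1 - (db b t r 0 + db b t 0 0) % 2 := by
    apply List.map_congr_left
    intro r hr
    have hr' := List.mem_range'_1.mp hr
    rw [dmatB_get b t r 0 (by omega) hC, dmatB_get b t 0 0 hR hC]
    have := db_nonneg b t r 0; have := db_lt b t r 0
    have := db_nonneg b t 0 0; have := db_lt b t 0 0
    omega
  rw [h1, sum_one_sub, SRd_split b t hR]
  simp [List.length_range']
  omega

theorem cols_sum_zero (b t : List (List Int))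
    (hR : 0 < b.length) :
    (colsB (dmatB b t) (b.headD []).length 0).sum = SCd b t := by
  unfold colsB SCd
  apply congrArg List.sum
  apply List.map_congr_left
  intro c hc
  rw [dmatB_get b t 0 c hR (List.mem_range.mp hc)]
  have := db_nonneg b t 0 c; have := db_lt b t 0 c
  omega

theorem cols_sum_one (b t : List (List Int))
    (hR : 0 < b.length) :
    (colsB (dmatB b t) (b.headD []).length 1).sum = ((b.headD []).length : Int) - SCd b t := by
  unfold colsB
  have h1 : ((List.range (b.headD []).length).map fun c =>
      (((dmatB b t).getD 0 []).getD c 0 + 1) % 2)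
      = (List.range (b.headD []).length).map fun c => 1 - db b t 0 c := by
    apply List.map_congr_left
    intro c hc
    rw [dmatB_get b t 0 c hR (List.mem_range.mp hc)]
    have := db_nonneg b t 0 c; have := db_lt b t 0 c
    omega
  rw [h1, sum_one_sub]
  unfold SCd
  simp

-- ===== VERDICT (by name: the statement is the Claim_ definition above) =====
theorem solution_spec : Claim_equal_solution := by
  intro b t hdom hpre
  obtain ⟨hne, -⟩ := hpre
  have hR : 0 < b.length := List.length_pos_of_ne_nil hne
  unfold Spec_solution
  simp only [solution, solution_alt]
  rw [solution_fold]
  by_cases hC0 : (b.headD []).length = 0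
  · rw [if_pos hC0]
    have hmem : ((0, 0) : Nat × Nat) ∈ pairsD b.length (b.headD []).length :=
      (mem_pairs _ _ _).mpr ⟨Nat.two_pow_pos _, Nat.two_pow_pos _⟩
    have hch : checkA b t 0 0 = true := by
      rw [checkA_iff]; intro r hr c hc; rw [hC0] at hc; omega
    have h1 := mfold_le (pairsD b.length (b.headD []).length)
      (fun x => checkA b t x.1 x.2) (fun x => countA x.1 + countA x.2) 1000000000 (0, 0) hmem hch
    have hc00 : countA 0 = 0 := by rw [countA]; norm_num
    beta_reduce at h1
    rw [hc00] at h1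
    have h2 := mfold_cases (pairsD b.length (b.headD []).length)
      (fun x => checkA b t x.1 x.2) (fun x => countA x.1 + countA x.2) 1000000000
    have hfold : mfold (pairsD b.length (b.headD []).length)
        (fun x => checkA b t x.1 x.2) (fun x => countA x.1 + countA x.2) 1000000000 = 0 := by
      rcases h2 with h | ⟨x, hx, hp, he⟩
      · omega
      · have := countA_nonneg x.1
        have := countA_nonneg x.2
        omega
    rw [hfold]
    norm_num
  · have hC : 0 < (b.headD []).length := by omega
    rw [if_neg hC0]
    simp only [List.foldl_cons, List.foldl_nil]
    set M := mfold (pairsD b.length (b.headD []).length)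
      (fun x => checkA b t x.1 x.2) (fun x => countA x.1 + countA x.2) 1000000000 with hM
    by_cases hcon : ConD b t
    · rw [if_pos ((chkB_iff b t 0 (Or.inl rfl) hR hC).mpr hcon),
          if_pos ((chkB_iff b t 1 (Or.inr rfl) hR hC).mpr hcon)]
      rw [rows_sum_zero b t hR hC, cols_sum_zero b t hR,
          rows_sum_one b t hR hC, cols_sum_one b t hR]
      have hv0 := con_valid0 b t hcon
      have hv1 := con_valid1 b t hcon
      have hm0 : (maskOf (grB b t) b.length, maskOf (gcB b t) (b.headD []).length)
          ∈ pairsD b.length (b.headD []).length :=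
        (mem_pairs _ _ _).mpr ⟨maskOf_lt _ _, maskOf_lt _ _⟩
      have hm1 : (maskOf (fun r => !grB b t r) b.length,
          maskOf (fun c => !gcB b t c) (b.headD []).length)
          ∈ pairsD b.length (b.headD []).length :=
        (mem_pairs _ _ _).mpr ⟨maskOf_lt _ _, maskOf_lt _ _⟩
      have hle0 := mfold_le (pairsD b.length (b.headD []).length)
        (fun x => checkA b t x.1 x.2) (fun x => countA x.1 + countA x.2) 1000000000 _ hm0 hv0
      have hle1 := mfold_le (pairsD b.length (b.headD []).length)
        (fun x => checkA b t x.1 x.2) (fun x => countA x.1 + countA x.2) 1000000000 _ hm1 hv1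
      dsimp only at hle0 hle1
      rw [← hM] at hle0 hle1
      have hle_init : M ≤ 1000000000 := by
        rw [hM]; exact mfold_le_init _ _ _ _
      have hS0 := count0 b t
      have hS1 := count1 b t
      have hcases : M = 1000000000
          ∨ M = countA (maskOf (grB b t) b.length) + countA (maskOf (gcB b t) (b.headD []).length)
          ∨ M = countA (maskOf (fun r => !grB b t r) b.length)
              + countA (maskOf (fun c => !gcB b t c) (b.headD []).length) := by
        rcases mfold_cases (pairsD b.length (b.headD []).length)
          (fun x => checkA b t x.1 x.2) (fun x => countA x.1 + countA x.2) 1000000000 with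
          h | ⟨x, hx, hp, he⟩
        · left; rw [hM]; exact h
        · have hxmem := (mem_pairs _ _ _).mp hx
          rcases unique b t x.1 x.2 hR hC hxmem.1 hxmem.2 hp with ⟨h1, h2⟩ | ⟨h1, h2⟩
          · right; left; rw [hM, he, h1, h2]
          · right; right; rw [hM, he, h1, h2]
      have hMeq : M = min (min 1000000000 (SRd b t + SCd b t))
          (((b.length : Int) - SRd b t) + (((b.headD []).length : Int) - SCd b t)) := by
        omega
      rw [← hMeq]
    · rw [if_neg (fun hh => hcon ((chkB_iff b t 0 (Or.inl rfl) hR hC).mp hh)),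
          if_neg (fun hh => hcon ((chkB_iff b t 1 (Or.inr rfl) hR hC).mp hh))]
      have hfold : M = 1000000000 := by
        rcases mfold_cases (pairsD b.length (b.headD []).length)
          (fun x => checkA b t x.1 x.2) (fun x => countA x.1 + countA x.2) 1000000000 with
          h | ⟨x, hx, hp, he⟩
        · rw [hM]; exact h
        · exact absurd (valid_con b t x.1 x.2 hp) hcon
      rw [hfold]
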